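-- pv_equiv track=rewrite | github.com/MohabYasser2/NLP_PROJ | src/features/contextual_embeddings.py | _compute_word_spans
-- ===== SOURCE A (Python) =====
-- from typing import List, Optional, Tuple, Dict
--
-- def _compute_word_spans(text: str) -> List[Tuple[int, int]]:
--     """
--     Return (start,end) spans of words in the original string.
--     Words are separated by whitespace.
--     """
--     spans: List[Tuple[int, int]] = []
--     n = len(text)
--     i = 0
--     while i < n:
--         while i < n and text[i].isspace():
--             i += 1
--         if i >= n:
--             break
--         start = i
--         while i < n and not text[i].isspace():
--             i += 1
--         end = i
--         spans.append((start, end))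
--     return spans
-- ===== SOURCE B (Python) =====
-- def _compute_word_spans(text):
--     """
--     Return (start,end) spans of words in the original string.
--     Words are separated by whitespace.
--     """
--     spans = []
--     start = None
--     for i, ch in enumerate(text):
--         if start is None:
--             if not ch.isspace():
--                 start = i
--         elif ch.isspace():
--             spans.append((start, i))
--             start = None
--     if start is not None:
--         spans.append((start, len(text)))
--     return spans
-- ===== Notes on version B (the rewrite author's own statement) =====
-- stated objective: simpler
-- what changed: Replaced the nested skip-whitespace/consume-word while-loops with a single flat enumerate pass that tracks an optional current word start and flushes the open word after the loop.
import Mathlib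
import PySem

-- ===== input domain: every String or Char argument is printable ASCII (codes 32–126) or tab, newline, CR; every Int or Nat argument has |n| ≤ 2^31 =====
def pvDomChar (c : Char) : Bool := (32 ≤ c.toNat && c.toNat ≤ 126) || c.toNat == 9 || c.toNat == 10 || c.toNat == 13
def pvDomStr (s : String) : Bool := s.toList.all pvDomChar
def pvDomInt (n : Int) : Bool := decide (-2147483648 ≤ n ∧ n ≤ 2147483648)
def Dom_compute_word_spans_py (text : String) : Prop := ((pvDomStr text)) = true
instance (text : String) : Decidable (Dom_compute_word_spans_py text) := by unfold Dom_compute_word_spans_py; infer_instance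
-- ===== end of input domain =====

-- B replaces A's nested skip-whitespace/consume-word while-loops with one flat
-- enumerate pass tracking an optional word start (objective: simpler).

-- ===== PORT A =====
-- inner loop `while i < n and text[i].isspace(): i += 1`
-- (transcribed over the remaining suffix, carrying the index i)
def pvSkipWs : List Char → Nat → List Char × Nat
  | [], i => ([], i)
  | c :: cs, i => if PySem.Chars.isspace c then pvSkipWs cs (i + 1) else (c :: cs, i)

-- inner loop `while i < n and not text[i].isspace(): i += 1`
def pvTakeWord : List Char → Nat → List Char × Nat
  | [], i => ([], i)
  | c :: cs, i => if ¬ PySem.Chars.isspace c then pvTakeWord cs (i + 1) else (c :: cs, i)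

-- (termination facts for the outer loop)
theorem pvSkipWs_len (cs : List Char) (i : Nat) : (pvSkipWs cs i).1.length ≤ cs.length := by
  induction cs generalizing i with
  | nil => simp [pvSkipWs]
  | cons c cs ih =>
    simp only [pvSkipWs]
    split
    · exact Nat.le_trans (ih _) (Nat.le_succ _)
    · simp

theorem pvTakeWord_len (cs : List Char) (i : Nat) : (pvTakeWord cs i).1.length ≤ cs.length := by
  induction cs generalizing i with
  | nil => simp [pvTakeWord]
  | cons c cs ih =>
    simp only [pvTakeWord]
    split
    · exact Nat.le_trans (ih _) (Nat.le_succ _)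
    · simp

theorem pvSkipWs_head (cs : List Char) (i : Nat) (c : Char) (rest : List Char) (j : Nat)
    (h : pvSkipWs cs i = (c :: rest, j)) : PySem.Chars.isspace c = false := by
  induction cs generalizing i with
  | nil => simp [pvSkipWs] at h
  | cons d ds ih =>
    by_cases hd : PySem.Chars.isspace d = true
    · exact ih (i + 1) (by simpa [pvSkipWs, hd] using h)
    · simp only [pvSkipWs, if_neg hd, Prod.mk.injEq, List.cons.injEq] at h
      rw [← h.1.1]
      simpa using hd

theorem pvTakeWord_cons (c : Char) (cs : List Char) (i : Nat)
    (h : PySem.Chars.isspace c = false) : pvTakeWord (c :: cs) i = pvTakeWord cs (i + 1) := by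
  simp [pvTakeWord, h]

-- outer loop `while i < n: …` ; each iteration skips whitespace, stops at the end,
-- else consumes a word and appends (start, end)
def pvOuter : List Char → Nat → List (Int × Int)
  | cs, i =>
    if hn : (pvSkipWs cs i).1 = [] then []
    else
      (((pvSkipWs cs i).2 : Int), ((pvTakeWord (pvSkipWs cs i).1 (pvSkipWs cs i).2).2 : Int)) ::
        pvOuter (pvTakeWord (pvSkipWs cs i).1 (pvSkipWs cs i).2).1
                (pvTakeWord (pvSkipWs cs i).1 (pvSkipWs cs i).2).2
termination_by cs _ => cs.length
decreasing_by
  cases h : (pvSkipWs cs i).1 with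
  | nil => exact absurd h hn
  | cons c rest =>
    have hc : PySem.Chars.isspace c = false :=
      pvSkipWs_head cs i c rest (pvSkipWs cs i).2 (by rw [← h])
    have h1 : (pvTakeWord rest ((pvSkipWs cs i).2 + 1)).1.length ≤ rest.length :=
      pvTakeWord_len rest _
    have h2 : (c :: rest).length ≤ cs.length := h ▸ pvSkipWs_len cs i
    rw [pvTakeWord_cons c rest (pvSkipWs cs i).2 hc]
    simp only [List.length_cons] at h2
    omega

def compute_word_spans_py (text : String) : List (Int × Int) :=
  pvOuter text.toList 0

-- ===== PORT B =====
-- loop body of `for i, ch in enumerate(text)`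
def pvStep (st : List (Int × Int) × Option Nat) (p : Nat × Char) : List (Int × Int) × Option Nat :=
  match st, p with
  | (spans, none), (i, ch) =>
    if ¬ PySem.Chars.isspace ch then (spans, some i) else (spans, none)
  | (spans, some s), (i, ch) =>
    if PySem.Chars.isspace ch then (spans ++ [((s : Int), (i : Int))], none) else (spans, some s)

-- `enumerate(text)` starting at index k (B uses k = 0)
def pvEnumFrom : Nat → List Char → List (Nat × Char)
  | _, [] => []
  | k, c :: cs => (k, c) :: pvEnumFrom (k + 1) cs

-- the final `if start is not None: spans.append((start, len(text)))`
def pvFlush (st : List (Int × Int) × Option Nat) (n : Nat) : List (Int × Int) :=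
  match st with
  | (spans, none) => spans
  | (spans, some s) => spans ++ [((s : Int), (n : Int))]

def compute_word_spans_py_alt (text : String) : List (Int × Int) :=
  pvFlush ((pvEnumFrom 0 text.toList).foldl pvStep ([], none)) text.toList.length

-- ===== PRECONDITION & SPEC =====
def Spec_compute_word_spans_py (text : String) (out : List (Int × Int)) : Prop := out = compute_word_spans_py_alt text
instance (text : String) (out : List (Int × Int)) : Decidable (Spec_compute_word_spans_py text out) := by unfold Spec_compute_word_spans_py; infer_instance

-- ===== CLAIM (what is proved, stated in full; the proofs are below) =====
def Claim_equal_compute_word_spans_py : Prop := ∀ (text : String), Dom_compute_word_spans_py text → Spec_compute_word_spans_py text (compute_word_spans_py text)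

-- ===== LEMMAS AND PROOFS =====

theorem pvSkipWs_cons_space (c : Char) (cs : List Char) (i : Nat)
    (h : PySem.Chars.isspace c = true) : pvSkipWs (c :: cs) i = pvSkipWs cs (i + 1) := by
  simp [pvSkipWs, h]

theorem pvSkipWs_cons_word (c : Char) (cs : List Char) (i : Nat)
    (h : PySem.Chars.isspace c = false) : pvSkipWs (c :: cs) i = (c :: cs, i) := by
  simp [pvSkipWs, h]

theorem pvTakeWord_cons_space (c : Char) (cs : List Char) (i : Nat)
    (h : PySem.Chars.isspace c = true) : pvTakeWord (c :: cs) i = (c :: cs, i) := by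
  simp [pvTakeWord, h]

theorem pvOuter_nil (i : Nat) : pvOuter [] i = [] := by
  rw [pvOuter]
  simp [pvSkipWs]

theorem pvOuter_cons_space (c : Char) (cs : List Char) (i : Nat)
    (h : PySem.Chars.isspace c = true) :
    pvOuter (c :: cs) i = pvOuter cs (i + 1) := by
  conv_lhs => rw [pvOuter]
  conv_rhs => rw [pvOuter]
  rw [pvSkipWs_cons_space c cs i h]

theorem pvOuter_cons_word (c : Char) (cs : List Char) (i : Nat)
    (h : PySem.Chars.isspace c = false) :
    pvOuter (c :: cs) i =
      ((i : Int), ((pvTakeWord cs (i + 1)).2 : Int)) ::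
        pvOuter (pvTakeWord cs (i + 1)).1 (pvTakeWord cs (i + 1)).2 := by
  conv_lhs => rw [pvOuter]
  rw [pvSkipWs_cons_word c cs i h]
  rw [dif_neg (by simp)]
  rw [pvTakeWord_cons c cs i h]

-- Combined loop invariant: B's fold state (closed / open word) against A's machinery.
theorem pv_main (cs : List Char) :
    (∀ (i : Nat) (acc : List (Int × Int)),
        pvFlush ((pvEnumFrom i cs).foldl pvStep (acc, none)) (i + cs.length)
          = acc ++ pvOuter cs i) ∧
    (∀ (i s : Nat) (acc : List (Int × Int)),
        pvFlush ((pvEnumFrom i cs).foldl pvStep (acc, some s)) (i + cs.length)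
          = acc ++ ((s : Int), ((pvTakeWord cs i).2 : Int)) ::
              pvOuter (pvTakeWord cs i).1 (pvTakeWord cs i).2) := by
  induction cs with
  | nil =>
    constructor
    · intro i acc; simp [pvEnumFrom, pvFlush, pvOuter_nil]
    · intro i s acc; simp [pvEnumFrom, pvFlush, pvTakeWord, pvOuter_nil]
  | cons c cs ih =>
    obtain ⟨ih1, ih2⟩ := ih
    have hlen : ∀ i : Nat, i + (c :: cs).length = (i + 1) + cs.length := by
      intro i; simp [List.length_cons]; omega
    constructor
    · intro i acc
      by_cases h : PySem.Chars.isspace c = true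
      · rw [show pvEnumFrom i (c :: cs) = (i, c) :: pvEnumFrom (i + 1) cs from rfl,
          List.foldl_cons,
          show pvStep (acc, none) (i, c) = (acc, none) from by simp [pvStep, h],
          hlen i, ih1, pvOuter_cons_space c cs i h]
      · replace h : PySem.Chars.isspace c = false := by simpa using h
        rw [show pvEnumFrom i (c :: cs) = (i, c) :: pvEnumFrom (i + 1) cs from rfl,
          List.foldl_cons,
          show pvStep (acc, none) (i, c) = (acc, some i) from by simp [pvStep, h],
          hlen i, ih2, pvOuter_cons_word c cs i h]
    · intro i s acc
      by_cases h : PySem.Chars.isspace c = true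
      · rw [show pvEnumFrom i (c :: cs) = (i, c) :: pvEnumFrom (i + 1) cs from rfl,
          List.foldl_cons,
          show pvStep (acc, some s) (i, c) = (acc ++ [((s : Int), (i : Int))], none) from by
            simp [pvStep, h],
          hlen i, ih1, pvTakeWord_cons_space c cs i h, pvOuter_cons_space c cs i h]
        simp
      · replace h : PySem.Chars.isspace c = false := by simpa using h
        rw [show pvEnumFrom i (c :: cs) = (i, c) :: pvEnumFrom (i + 1) cs from rfl,
          List.foldl_cons,
          show pvStep (acc, some s) (i, c) = (acc, some s) from by simp [pvStep, h],
          hlen i, ih2, pvTakeWord_cons c cs i h]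

-- ===== VERDICT (by name: the statement is the Claim_ definition above) =====
theorem compute_word_spans_py_spec : Claim_equal_compute_word_spans_py := by
  intro text _
  unfold Spec_compute_word_spans_py compute_word_spans_py compute_word_spans_py_alt
  have := (pv_main text.toList).1 0 []
  simpa using this.symm
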